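-- pv_equiv track=rewrite | github.com/leonardo-de-souza/Hackathon-SantoDigital2023 | Desafio 0/desafio_0.py | exercicio1
-- ===== SOURCE A (Python) =====
-- def exercicio1(n):
--     lista = []
--
--     while n > 0:
--         str = ""
--
--         for i in range(n):
--             str += "*"
--
--         lista.append(str)
--         n -= 1
--
--     lista.reverse()
--     return lista
-- ===== SOURCE B (Python) =====
-- def exercicio1(n):
--     out = []
--     s = ""
--     for _ in range(n):
--         s += "*"
--         out.append(s)
--     return out
-- ===== Notes on version B (the rewrite author's own statement) =====
-- stated objective: faster
-- what changed: Single count-up pass that extends one running prefix string and appends it, instead of rebuilding each string with an inner loop while counting down and reversing at the end.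
import Mathlib
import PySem

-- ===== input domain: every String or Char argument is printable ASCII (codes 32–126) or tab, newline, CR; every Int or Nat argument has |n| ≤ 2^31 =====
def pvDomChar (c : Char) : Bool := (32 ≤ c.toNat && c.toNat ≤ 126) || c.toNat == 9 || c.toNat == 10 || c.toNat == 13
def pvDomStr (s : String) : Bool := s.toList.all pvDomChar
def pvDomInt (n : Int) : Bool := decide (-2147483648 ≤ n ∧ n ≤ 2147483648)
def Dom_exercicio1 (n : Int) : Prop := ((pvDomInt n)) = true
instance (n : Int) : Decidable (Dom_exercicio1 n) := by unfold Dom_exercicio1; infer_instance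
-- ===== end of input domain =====

-- B replaces A's countdown-with-inner-rebuild-loop-then-reverse by one count-up pass
-- that extends a single running prefix string (objective: faster, constant-factor).


-- ===== PORT A =====
-- inner loop: str = ""; for i in range(n): str += "*"
def pvStarsA (n : Int) : String :=
  (PySem.List.pyRange 0 n 1).foldl (fun s _ => s ++ "*") ""

-- while n > 0: lista.append(str_of_n); n -= 1
def pvLoopA (n : Int) (lista : List String) : List String :=
  if n > 0 then pvLoopA (n - 1) (lista ++ [pvStarsA n]) else lista
termination_by n.toNat
decreasing_by omega

def exercicio1 (n : Int) : List String := (pvLoopA n []).reverse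

-- ===== PORT B =====
-- s = ""; out = []; for _ in range(n): s += "*"; out.append(s)
def exercicio1_alt (n : Int) : List String :=
  ((PySem.List.pyRange 0 n 1).foldl
    (fun (p : String × List String) _ =>
      let s := p.1 ++ "*"
      (s, p.2 ++ [s])) ("", [])).2

-- ===== PRECONDITION & SPEC =====
def Spec_exercicio1 (n : Int) (out : List String) : Prop := out = exercicio1_alt n
instance (n : Int) (out : List String) : Decidable (Spec_exercicio1 n out) := by unfold Spec_exercicio1; infer_instance

-- ===== CLAIM (what is proved, stated in full; the proofs are below) =====
def Claim_equal_exercicio1 : Prop := ∀ (n : Int), Dom_exercicio1 n → Spec_exercicio1 n (exercicio1 n)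

-- ===== LEMMAS AND PROOFS =====

-- m stars, the common value both sides build
def pvStars (m : Nat) : String := String.ofList (List.replicate m '*')

theorem pvStars_succ (m : Nat) : pvStars (m + 1) = pvStars m ++ "*" := by
  simp [pvStars, List.replicate_succ']

theorem pvStars_succ' (m : Nat) : pvStars (m + 1) = "*" ++ pvStars m := by
  unfold pvStars
  rw [show ("*":String) = String.ofList ['*'] from rfl, ← String.ofList_append]
  simp [List.replicate_succ]

-- A's inner fold only cares about the list's length
theorem foldA_length {α : Type} (l : List α) (s : String) :
    l.foldl (fun s _ => s ++ "*") s = s ++ pvStars l.length := by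
  induction l generalizing s with
  | nil => simp [pvStars]
  | cons a t ih =>
    simp only [List.foldl_cons, List.length_cons, ih, pvStars_succ', String.append_assoc]

theorem pvStarsA_eq (n : Int) : pvStarsA n = pvStars n.toNat := by
  unfold pvStarsA
  rw [foldA_length]
  simp [PySem.List.length_pyRange_one]

theorem pvLoopA_eq (m : Nat) (lista : List String) :
    pvLoopA (m : Int) lista = lista ++ (List.range m).map (fun i => pvStars (m - i)) := by
  induction m generalizing lista with
  | zero => rw [pvLoopA]; simp
  | succ k ih =>
    rw [pvLoopA, if_pos (by exact_mod_cast Nat.succ_pos k)]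
    have h1 : ((k+1:Nat):Int) - 1 = (k:Int) := by push_cast; ring
    rw [h1, ih, pvStarsA_eq]
    rw [List.range_succ_eq_map]
    simp [List.append_assoc, List.map_map, Function.comp]

-- B's fold maintains: s = pvStars (#steps so far), out = the prefix strings so far
theorem foldB_inv {α : Type} (l : List α) (m : Nat) :
    l.foldl
      (fun (p : String × List String) _ =>
        let s := p.1 ++ "*"
        (s, p.2 ++ [s]))
      (pvStars m, (List.range m).map (fun i => pvStars (i + 1)))
    = (pvStars (m + l.length),
       (List.range (m + l.length)).map (fun i => pvStars (i + 1))) := by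
  induction l generalizing m with
  | nil => simp
  | cons a t ih =>
    simp only [List.foldl_cons, List.length_cons]
    rw [← pvStars_succ]
    have h2 : (List.range m).map (fun i => pvStars (i + 1)) ++ [pvStars (m + 1)]
        = (List.range (m + 1)).map (fun i => pvStars (i + 1)) := by
      rw [List.range_succ]; simp
    rw [h2, ih]
    have e : m + 1 + t.length = m + (t.length + 1) := by omega
    rw [e]

theorem exercicio1_alt_eq (n : Int) :
    exercicio1_alt n = (List.range n.toNat).map (fun i => pvStars (i + 1)) := by
  unfold exercicio1_alt
  have h0 : (("" : String), ([] : List String))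
      = (pvStars 0, (List.range 0).map (fun i => pvStars (i + 1))) := by
    simp [pvStars]
  rw [h0, foldB_inv]
  simp [PySem.List.length_pyRange_one]

theorem exercicio1_eq (n : Int) :
    exercicio1 n = ((List.range n.toNat).map (fun i => pvStars (n.toNat - i))).reverse := by
  unfold exercicio1
  rcases (by omega : n ≤ 0 ∨ 0 < n) with h | h
  · have hz : n.toNat = 0 := by omega
    rw [hz, pvLoopA, if_neg (show ¬ n > 0 by omega)]
    simp
  · rw [show n = ((n.toNat : Nat) : Int) by omega, pvLoopA_eq]
    simp
    rw [show max n 0 = n from max_eq_left (le_of_lt h)]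

theorem reverse_countdown (m : Nat) :
    ((List.range m).map (fun i => pvStars (m - i))).reverse
    = (List.range m).map (fun i => pvStars (i + 1)) := by
  apply List.ext_getElem
  · simp
  · intro i h1 h2
    simp only [List.getElem_reverse, List.getElem_map, List.getElem_range]
    simp at h1 h2 ⊢
    congr 1
    omega

-- ===== VERDICT (by name: the statement is the Claim_ definition above) =====
theorem exercicio1_spec : Claim_equal_exercicio1 := by
  intro n _
  unfold Spec_exercicio1
  rw [exercicio1_eq, exercicio1_alt_eq, reverse_countdown]
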